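-- pv_equiv track=rewrite | github.com/VojtaM39/badminton_cv_utils | utils/corner_detector.py | get_corners_from_lines
-- ===== SOURCE A (Python) =====
-- def get_corners_from_lines(lines, width, height):
--   x_mid = width // 2
--
--   BIG_NUMBER = 99999
--   SMALL_NUMBER = -1
--   CENTER_OFFSET = 20
--
--   top_left = (BIG_NUMBER, BIG_NUMBER)
--   top_right = (SMALL_NUMBER, BIG_NUMBER)
--   bottom_left = (BIG_NUMBER, SMALL_NUMBER)
--   bottom_right = (SMALL_NUMBER, SMALL_NUMBER)
--
--   for line_wrapper in lines:
--     line = line_wrapper[0]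
--
--     point1 = (line[0], line[1])
--     point2 = (line[2], line[3])
--
--     for point in [point1, point2]:
--       if point[0] < x_mid - CENTER_OFFSET and point[1] < top_left[1]:
--         top_left = point
--
--       if point[0] > x_mid + CENTER_OFFSET and point[1] < top_right[1]:
--         top_right = point
--
--       if point[0] < x_mid - CENTER_OFFSET and point[1] > bottom_left[1]:
--         bottom_left = point
--
--       if point[0] > x_mid + CENTER_OFFSET and point[1] > bottom_right[1]:
--         bottom_right = point
--
--   return top_left, top_right, bottom_left, bottom_right
-- ===== SOURCE B (Python) =====
-- def get_corners_from_lines(lines, width, height):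
--     x_mid = width // 2
--     pts = []
--     for line_wrapper in lines:
--         line = line_wrapper[0]
--         pts.append((line[0], line[1]))
--         pts.append((line[2], line[3]))
--     left = [p for p in pts if p[0] < x_mid - 20]
--     right = [p for p in pts if p[0] > x_mid + 20]
--     top_left = min([(99999, 99999)] + left, key=lambda p: p[1])
--     top_right = min([(-1, 99999)] + right, key=lambda p: p[1])
--     bottom_left = max([(99999, -1)] + left, key=lambda p: p[1])
--     bottom_right = max([(-1, -1)] + right, key=lambda p: p[1])
--     return top_left, top_right, bottom_left, bottom_right
-- ===== Notes on version B (the rewrite author's own statement) =====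
-- stated objective: alternative
-- what changed: Instead of one loop threading four accumulators with strict-inequality updates, B flattens all endpoints into one point list, partitions it once by the x-midline thresholds, and computes each corner as a sentinel-seeded min/max by y (first extremum wins, matching A's strict updates).
import Mathlib
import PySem

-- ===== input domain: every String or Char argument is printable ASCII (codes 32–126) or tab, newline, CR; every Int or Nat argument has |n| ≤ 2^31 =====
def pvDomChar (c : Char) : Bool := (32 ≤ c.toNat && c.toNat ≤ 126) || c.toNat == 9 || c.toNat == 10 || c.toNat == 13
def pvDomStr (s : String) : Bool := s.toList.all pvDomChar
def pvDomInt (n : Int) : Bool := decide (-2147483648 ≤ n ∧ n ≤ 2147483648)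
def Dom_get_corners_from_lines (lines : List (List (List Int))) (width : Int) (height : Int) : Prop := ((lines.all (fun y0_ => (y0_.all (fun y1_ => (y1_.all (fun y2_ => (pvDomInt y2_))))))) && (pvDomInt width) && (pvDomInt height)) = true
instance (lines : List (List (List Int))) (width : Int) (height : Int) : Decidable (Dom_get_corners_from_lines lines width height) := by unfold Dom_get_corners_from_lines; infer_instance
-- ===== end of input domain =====

-- B flattens the endpoints into one point list, partitions it by the x threshold once, and
-- computes each corner as a sentinel-seeded min/max by y (objective: simpler decomposition, same cost).

-- ===== PORT A =====
-- xs[i] for the constant nonnegative indices 0..3; Pre_ guarantees in range, default never reached there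
def pvIdx (l : List Int) (i : Int) : Int := (PySem.List.pyGet? l i).getD 0

def pvLineStep (m1 m2 : Int) (st : (Int × Int) × (Int × Int) × (Int × Int) × (Int × Int)) (line_wrapper : List (List Int)) : (Int × Int) × (Int × Int) × (Int × Int) × (Int × Int) :=
  let line := (PySem.List.pyGet? line_wrapper 0).getD []
  let point1 := (pvIdx line 0, pvIdx line 1)
  let point2 := (pvIdx line 2, pvIdx line 3)
  [point1, point2].foldl (fun st point =>
    let tl := if point.1 < m1 ∧ point.2 < st.1.2 then point else st.1
    let tr := if point.1 > m2 ∧ point.2 < st.2.1.2 then point else st.2.1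
    let bl := if point.1 < m1 ∧ point.2 > st.2.2.1.2 then point else st.2.2.1
    let br := if point.1 > m2 ∧ point.2 > st.2.2.2.2 then point else st.2.2.2
    (tl, tr, bl, br)) st

def get_corners_from_lines (lines : List (List (List Int))) (width : Int) (height : Int) : (Int × Int) × (Int × Int) × (Int × Int) × (Int × Int) :=
  let x_mid := PySem.Int.floordiv width 2
  lines.foldl (pvLineStep (x_mid - 20) (x_mid + 20))
    (((99999 : Int), (99999 : Int)), ((-1 : Int), (99999 : Int)), ((99999 : Int), (-1 : Int)), ((-1 : Int), (-1 : Int)))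

-- ===== PORT B =====
-- min(s :: l, key=lambda p: p[1]) : Python keeps the FIRST minimal element (strict-< replacement)
def pvMinBySnd (s : Int × Int) (l : List (Int × Int)) : Int × Int :=
  l.foldl (fun acc p => if p.2 < acc.2 then p else acc) s

-- max(s :: l, key=lambda p: p[1]) : first maximal element
def pvMaxBySnd (s : Int × Int) (l : List (Int × Int)) : Int × Int :=
  l.foldl (fun acc p => if p.2 > acc.2 then p else acc) s

def get_corners_from_lines_alt (lines : List (List (List Int))) (width : Int) (height : Int) : (Int × Int) × (Int × Int) × (Int × Int) × (Int × Int) :=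
  let x_mid := PySem.Int.floordiv width 2
  let pts := lines.flatMap (fun line_wrapper =>
    let line := (PySem.List.pyGet? line_wrapper 0).getD []
    [(pvIdx line 0, pvIdx line 1), (pvIdx line 2, pvIdx line 3)])
  let left := pts.filter (fun p => p.1 < x_mid - 20)
  let right := pts.filter (fun p => p.1 > x_mid + 20)
  (pvMinBySnd (99999, 99999) left, pvMinBySnd (-1, 99999) right,
   pvMaxBySnd (99999, -1) left, pvMaxBySnd (-1, -1) right)

-- ===== PRECONDITION & SPEC =====
-- Pre_ excludes exactly the inputs where the Python A raises IndexError: an empty line wrapper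
-- or a first line with fewer than four coordinates.
def Pre_get_corners_from_lines (lines : List (List (List Int))) (width : Int) (height : Int) : Prop :=
  ∀ lw ∈ lines, lw ≠ [] ∧ 4 ≤ (lw.headD []).length
instance (lines : List (List (List Int))) (width : Int) (height : Int) : Decidable (Pre_get_corners_from_lines lines width height) := by unfold Pre_get_corners_from_lines; infer_instance

def pvWitness_get_corners_from_lines : List (List (List Int)) × Int × Int := ([[[10, 5, 90, 60]], [[15, 55, 85, 8]]], 100, 70)

def Spec_get_corners_from_lines (lines : List (List (List Int))) (width : Int) (height : Int) (out : (Int × Int) × (Int × Int) × (Int × Int) × (Int × Int)) : Prop := out = get_corners_from_lines_alt lines width height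
instance (lines : List (List (List Int))) (width : Int) (height : Int) (out : (Int × Int) × (Int × Int) × (Int × Int) × (Int × Int)) : Decidable (Spec_get_corners_from_lines lines width height out) := by unfold Spec_get_corners_from_lines; infer_instance

-- ===== CLAIM (what is proved, stated in full; the proofs are below) =====
def Claim_equal_get_corners_from_lines : Prop := ∀ (lines : List (List (List Int))) (width : Int) (height : Int), Dom_get_corners_from_lines lines width height → Pre_get_corners_from_lines lines width height → Spec_get_corners_from_lines lines width height (get_corners_from_lines lines width height)

-- ===== LEMMAS AND PROOFS =====

-- combined one-point update of A's four accumulators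
def pvStep (m1 m2 : Int) (st : (Int × Int) × (Int × Int) × (Int × Int) × (Int × Int)) (p : Int × Int) : (Int × Int) × (Int × Int) × (Int × Int) × (Int × Int) :=
  (if p.1 < m1 ∧ p.2 < st.1.2 then p else st.1,
   if p.1 > m2 ∧ p.2 < st.2.1.2 then p else st.2.1,
   if p.1 < m1 ∧ p.2 > st.2.2.1.2 then p else st.2.2.1,
   if p.1 > m2 ∧ p.2 > st.2.2.2.2 then p else st.2.2.2)

-- A's fold over lines is the fold of pvStep over the flattened point list
theorem foldA_eq_foldPts (m1 m2 : Int) (lines : List (List (List Int))) (st : (Int × Int) × (Int × Int) × (Int × Int) × (Int × Int)) :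
    lines.foldl (pvLineStep m1 m2) st
    = (lines.flatMap (fun line_wrapper =>
        let line := (PySem.List.pyGet? line_wrapper 0).getD []
        [(pvIdx line 0, pvIdx line 1), (pvIdx line 2, pvIdx line 3)])).foldl (pvStep m1 m2) st := by
  induction lines generalizing st with
  | nil => rfl
  | cons lw t ih =>
    simp only [List.foldl_cons, List.flatMap_cons, List.foldl_append]
    rw [ih]
    rfl

-- the combined fold splits into four independent filtered min/max folds
theorem foldPts_split (m1 m2 : Int) (pts : List (Int × Int)) (a b c d : Int × Int) :
    pts.foldl (pvStep m1 m2) (a, b, c, d)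
    = (pvMinBySnd a (pts.filter (fun p => p.1 < m1)),
       pvMinBySnd b (pts.filter (fun p => p.1 > m2)),
       pvMaxBySnd c (pts.filter (fun p => p.1 < m1)),
       pvMaxBySnd d (pts.filter (fun p => p.1 > m2))) := by
  induction pts generalizing a b c d with
  | nil => rfl
  | cons p t ih =>
    simp only [List.foldl_cons, List.filter_cons]
    by_cases h1 : p.1 < m1 <;> by_cases h2 : p.1 > m2 <;>
      simp only [pvStep, pvMinBySnd, pvMaxBySnd, h1, h2, decide_true, decide_false,
        if_true, if_false, true_and, false_and, if_false, List.foldl_cons] <;>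
      rw [ih] <;>
      by_cases hy1 : p.2 < a.2 <;> by_cases hy2 : p.2 < b.2 <;>
      by_cases hy3 : p.2 > c.2 <;> by_cases hy4 : p.2 > d.2 <;>
      simp [pvMinBySnd, pvMaxBySnd, hy1, hy2, hy3, hy4]

-- ===== VERDICT (by name: the statement is the Claim_ definition above) =====
theorem get_corners_from_lines_spec : Claim_equal_get_corners_from_lines := by
  intro lines width height _ _
  unfold Spec_get_corners_from_lines
  simp only [get_corners_from_lines, get_corners_from_lines_alt]
  rw [foldA_eq_foldPts, foldPts_split]
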